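-- pv_equiv track=rewrite | github.com/YHHuan/LUMEN | src/utils/normalizer.py | _find_outcome_data
-- ===== SOURCE A (Python) =====
-- def _find_outcome_data(outcomes: dict, measure_name: str, outcome_category: str) -> tuple:
--     """
--     Smart fuzzy matching for LLM-generated outcome keys.
--
--     Problem: pico.yaml says measure="MMSE", outcome="Global cognition"
--     LLM might produce: {"global_cognition_mmse": {"measure": "MMSE", ...}}
--     Or: {"mmse_post_treatment": {"measure": "MMSE", ...}}
--     Or: {"MMSE": {"measure": "MMSE", ...}}
--
--     Strategy (in priority order):
--     1. Check measure field inside each outcome → exact match on measure name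
--     2. Check if measure name appears in the outcome key itself
--     3. Check if outcome category appears in the outcome key
--
--     Returns: (outcome_data_dict, measure_name_used) or (None, None)
--     """
--     if not outcomes:
--         return None, None
--
--     measure_lower = measure_name.lower().strip()
--     category_lower = outcome_category.lower().strip()
--
--     # Pass 1: Match by "measure" field inside outcome data
--     for key, odata in outcomes.items():
--         m = (odata.get("measure") or "").lower().strip()
--         if measure_lower in m or m in measure_lower:
--             return odata, odata.get("measure", measure_name)
--
--     # Pass 2: Match by outcome key name containing measure
--     for key, odata in outcomes.items():
--         key_lower = key.lower().replace("_", " ").replace("-", " ")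
--         if measure_lower in key_lower:
--             return odata, odata.get("measure", measure_name)
--
--     # Pass 3: Match by outcome key containing category
--     for key, odata in outcomes.items():
--         key_lower = key.lower().replace("_", " ").replace("-", " ")
--         cat_words = category_lower.replace("_", " ").split()
--         if any(w in key_lower for w in cat_words if len(w) > 3):
--             return odata, odata.get("measure", key)
--
--     return None, None
-- ===== SOURCE B (Python) =====
-- def _find_outcome_data(outcomes: dict, measure_name: str, outcome_category: str) -> tuple:
--     """Single pass over outcomes keeping the best (lowest-tier, earliest) candidate."""
--     measure_lower = measure_name.lower().strip()
--     category_lower = outcome_category.lower().strip()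
--     cat_words = [w for w in category_lower.replace("_", " ").split() if len(w) > 3]
--
--     best = None  # (tier, key, odata); lowest tier wins, earliest key wins ties
--     for key, odata in outcomes.items():
--         m = (odata.get("measure") or "").lower().strip()
--         key_lower = key.lower().replace("_", " ").replace("-", " ")
--         if measure_lower in m or m in measure_lower:
--             tier = 1
--         elif measure_lower in key_lower:
--             tier = 2
--         elif any(w in key_lower for w in cat_words):
--             tier = 3
--         else:
--             tier = 4
--         if tier < (4 if best is None else best[0]):
--             best = (tier, key, odata)
--
--     if best is None:
--         return None, None
--     tier, key, odata = best
--     if tier <= 2: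
--         return odata, odata.get("measure", measure_name)
--     return odata, odata.get("measure", key)
-- ===== Notes on version B (the rewrite author's own statement) =====
-- stated objective: alternative
-- what changed: A's three sequential full scans (measure-field match, then key-contains-measure, then key-contains-category-word) are replaced by a single loop over outcomes.items() that scores each entry with its lowest matching tier and keeps the first entry of the strictly lowest tier, finalizing the result after the loop.
import Mathlib
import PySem

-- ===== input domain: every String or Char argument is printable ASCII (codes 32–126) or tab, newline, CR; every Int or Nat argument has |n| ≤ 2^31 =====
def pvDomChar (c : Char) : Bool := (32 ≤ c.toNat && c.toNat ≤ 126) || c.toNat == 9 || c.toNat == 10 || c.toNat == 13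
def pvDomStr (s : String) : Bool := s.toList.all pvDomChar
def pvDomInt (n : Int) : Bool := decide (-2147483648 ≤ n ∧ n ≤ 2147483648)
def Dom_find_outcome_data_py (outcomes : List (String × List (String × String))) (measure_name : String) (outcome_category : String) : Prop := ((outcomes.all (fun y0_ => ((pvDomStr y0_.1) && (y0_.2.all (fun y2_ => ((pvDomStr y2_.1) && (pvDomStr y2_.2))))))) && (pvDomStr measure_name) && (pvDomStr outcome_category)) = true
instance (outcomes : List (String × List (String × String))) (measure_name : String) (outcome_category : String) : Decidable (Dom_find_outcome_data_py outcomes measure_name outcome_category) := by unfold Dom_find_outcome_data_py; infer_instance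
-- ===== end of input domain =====

-- B replaces A's three sequential scans by a single pass keeping the best (lowest-tier, earliest)
-- candidate; objective: alternative decomposition (same cost class, one traversal instead of up to three).

-- ===== PORT A =====
-- m = (odata.get("measure") or "").lower().strip()   ('or ""' = default for missing; an empty value maps to itself)
def pvAMField (od : List (String × String)) : String :=
  PySem.Str.strip (PySem.Str.lower ((od.lookup "measure").getD ""))

-- key.lower().replace("_", " ").replace("-", " ")
def pvAKeyNorm (key : String) : String :=
  PySem.Str.replace (PySem.Str.replace (PySem.Str.lower key) "_" " ") "-" " "

-- Pass 1: match by "measure" field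
def pvAPass1 (ml mn : String) : List (String × List (String × String)) → Option ((Option (List (String × String))) × Option String)
  | [] => none
  | (_, od) :: rest =>
      let m := pvAMField od
      if PySem.Str.isIn ml m || PySem.Str.isIn m ml then
        some (some od, some ((od.lookup "measure").getD mn))
      else pvAPass1 ml mn rest

-- Pass 2: match by key containing measure
def pvAPass2 (ml mn : String) : List (String × List (String × String)) → Option ((Option (List (String × String))) × Option String)
  | [] => none
  | (key, od) :: rest =>
      if PySem.Str.isIn ml (pvAKeyNorm key) then
        some (some od, some ((od.lookup "measure").getD mn))
      else pvAPass2 ml mn rest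

-- Pass 3: match by key containing a category word longer than 3 chars
def pvAPass3 (cl : String) : List (String × List (String × String)) → Option ((Option (List (String × String))) × Option String)
  | [] => none
  | (key, od) :: rest =>
      let catWords := (PySem.Str.split₀ (PySem.Str.replace cl "_" " ")).filter (fun w => 3 < PySem.Str.len w)
      if catWords.any (fun w => PySem.Str.isIn w (pvAKeyNorm key)) then
        some (some od, some ((od.lookup "measure").getD key))
      else pvAPass3 cl rest

def find_outcome_data_py (outcomes : List (String × List (String × String))) (measure_name : String) (outcome_category : String) : (Option (List (String × String))) × Option String :=
  if outcomes.isEmpty then (none, none)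
  else
    let ml := PySem.Str.strip (PySem.Str.lower measure_name)
    let cl := PySem.Str.strip (PySem.Str.lower outcome_category)
    match pvAPass1 ml measure_name outcomes with
    | some r => r
    | none =>
      match pvAPass2 ml measure_name outcomes with
      | some r => r
      | none =>
        match pvAPass3 cl outcomes with
        | some r => r
        | none => (none, none)

-- ===== PORT B =====
-- the lowest tier (1/2/3, 4 = no match) at which this entry matches
def pvBTier (ml : String) (cw : List String) (key : String) (od : List (String × String)) : Nat :=
  let m := PySem.Str.strip (PySem.Str.lower ((od.lookup "measure").getD ""))
  let kl := PySem.Str.replace (PySem.Str.replace (PySem.Str.lower key) "_" " ") "-" " "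
  if PySem.Str.isIn ml m || PySem.Str.isIn m ml then 1
  else if PySem.Str.isIn ml kl then 2
  else if cw.any (fun w => PySem.Str.isIn w kl) then 3
  else 4

-- for key, odata in outcomes.items(): … if tier < (4 if best is None else best[0]): best = (tier, key, odata)
def pvBLoop (ml : String) (cw : List String) :
    List (String × List (String × String)) → Option (Nat × String × List (String × String)) → Option (Nat × String × List (String × String))
  | [], best => best
  | (key, od) :: rest, best =>
      let t := pvBTier ml cw key od
      pvBLoop ml cw rest (if t < (match best with | none => 4 | some b => b.1) then some (t, key, od) else best)

def find_outcome_data_py_alt (outcomes : List (String × List (String × String))) (measure_name : String) (outcome_category : String) : (Option (List (String × String))) × Option String :=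
  let ml := PySem.Str.strip (PySem.Str.lower measure_name)
  let cl := PySem.Str.strip (PySem.Str.lower outcome_category)
  let cw := (PySem.Str.split₀ (PySem.Str.replace cl "_" " ")).filter (fun w => 3 < PySem.Str.len w)
  match pvBLoop ml cw outcomes none with
  | none => (none, none)
  | some (t, key, od) =>
      if t ≤ 2 then (some od, some ((od.lookup "measure").getD measure_name))
      else (some od, some ((od.lookup "measure").getD key))

-- ===== PRECONDITION & SPEC =====
def Spec_find_outcome_data_py (outcomes : List (String × List (String × String))) (measure_name : String) (outcome_category : String) (out : (Option (List (String × String))) × Option String) : Prop := out = find_outcome_data_py_alt outcomes measure_name outcome_category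
instance (outcomes : List (String × List (String × String))) (measure_name : String) (outcome_category : String) (out : (Option (List (String × String))) × Option String) : Decidable (Spec_find_outcome_data_py outcomes measure_name outcome_category out) := by unfold Spec_find_outcome_data_py; infer_instance

-- ===== CLAIM (what is proved, stated in full; the proofs are below) =====
def Claim_equal_find_outcome_data_py : Prop := ∀ (outcomes : List (String × List (String × String))) (measure_name : String) (outcome_category : String), Dom_find_outcome_data_py outcomes measure_name outcome_category → Spec_find_outcome_data_py outcomes measure_name outcome_category (find_outcome_data_py outcomes measure_name outcome_category)

-- ===== LEMMAS AND PROOFS =====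

-- tier of an optional best candidate (4 = no candidate)
def pvBT (best : Option (Nat × String × List (String × String))) : Nat :=
  match best with | none => 4 | some b => b.1

-- best candidate of a list, recomputed from the right (proof-side view of pvBLoop)
def pvBestOf (ml : String) (cw : List String) : List (String × List (String × String)) → Option (Nat × String × List (String × String))
  | [] => none
  | (key, od) :: rest =>
      let t := pvBTier ml cw key od
      let c := pvBestOf ml cw rest
      if t < 4 ∧ t ≤ pvBT c then some (t, key, od) else c

def pvMerge (b c : Option (Nat × String × List (String × String))) : Option (Nat × String × List (String × String)) :=
  match c with
  | none => b
  | some c' => if c'.1 < pvBT b then some c' else b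

-- A's chain of the three passes
def pvChain (ml mn cl : String) (xs : List (String × List (String × String))) : (Option (List (String × String))) × Option String :=
  match pvAPass1 ml mn xs with
  | some r => r
  | none =>
    match pvAPass2 ml mn xs with
    | some r => r
    | none =>
      match pvAPass3 cl xs with
      | some r => r
      | none => (none, none)

-- B's finalization of the best candidate
def pvFinB (mn : String) (best : Option (Nat × String × List (String × String))) : (Option (List (String × String))) × Option String :=
  match best with
  | none => (none, none)
  | some (t, key, od) =>
      if t ≤ 2 then (some od, some ((od.lookup "measure").getD mn))
      else (some od, some ((od.lookup "measure").getD key))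

-- definitional unfoldings (all rfl)
lemma pvBTier_eq (ml : String) (cw : List String) (key : String) (od : List (String × String)) :
    pvBTier ml cw key od
      = if PySem.Str.isIn ml (pvAMField od) || PySem.Str.isIn (pvAMField od) ml then 1
        else if PySem.Str.isIn ml (pvAKeyNorm key) then 2
        else if cw.any (fun w => PySem.Str.isIn w (pvAKeyNorm key)) then 3
        else 4 := rfl

lemma pvAPass1_cons (ml mn key : String) (od : List (String × String)) (rest : List (String × List (String × String))) :
    pvAPass1 ml mn ((key, od) :: rest)
      = if PySem.Str.isIn ml (pvAMField od) || PySem.Str.isIn (pvAMField od) ml then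
          some (some od, some ((od.lookup "measure").getD mn))
        else pvAPass1 ml mn rest := rfl

lemma pvAPass2_cons (ml mn key : String) (od : List (String × String)) (rest : List (String × List (String × String))) :
    pvAPass2 ml mn ((key, od) :: rest)
      = if PySem.Str.isIn ml (pvAKeyNorm key) then
          some (some od, some ((od.lookup "measure").getD mn))
        else pvAPass2 ml mn rest := rfl

lemma pvAPass3_cons (cl key : String) (od : List (String × String)) (rest : List (String × List (String × String))) :
    pvAPass3 cl ((key, od) :: rest)
      = if ((PySem.Str.split₀ (PySem.Str.replace cl "_" " ")).filter (fun w => 3 < PySem.Str.len w)).any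
            (fun w => PySem.Str.isIn w (pvAKeyNorm key)) then
          some (some od, some ((od.lookup "measure").getD key))
        else pvAPass3 cl rest := rfl

lemma pvBestOf_cons (ml : String) (cw : List String) (key : String) (od : List (String × String)) (rest : List (String × List (String × String))) :
    pvBestOf ml cw ((key, od) :: rest)
      = if pvBTier ml cw key od < 4 ∧ pvBTier ml cw key od ≤ pvBT (pvBestOf ml cw rest)
        then some (pvBTier ml cw key od, key, od) else pvBestOf ml cw rest := rfl

lemma pvBLoop_cons (ml : String) (cw : List String) (key : String) (od : List (String × String))
    (rest : List (String × List (String × String))) (best : Option (Nat × String × List (String × String))) :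
    pvBLoop ml cw ((key, od) :: rest) best
      = pvBLoop ml cw rest
          (if pvBTier ml cw key od < pvBT best then some (pvBTier ml cw key od, key, od) else best) := rfl

lemma pvChain_eq (ml mn cl : String) (xs : List (String × List (String × String))) :
    pvChain ml mn cl xs
      = match pvAPass1 ml mn xs with
        | some r => r
        | none =>
          match pvAPass2 ml mn xs with
          | some r => r
          | none =>
            match pvAPass3 cl xs with
            | some r => r
            | none => (none, none) := rfl

lemma pvBTier_bounds (ml : String) (cw : List String) (key : String) (od : List (String × String)) :
    1 ≤ pvBTier ml cw key od ∧ pvBTier ml cw key od ≤ 4 := by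
  rw [pvBTier_eq]; split_ifs <;> omega

lemma pvBestOf_bounds (ml : String) (cw : List String) (xs : List (String × List (String × String))) :
    ∀ c', pvBestOf ml cw xs = some c' → 1 ≤ c'.1 ∧ c'.1 < 4 := by
  induction xs with
  | nil => intro c' h; cases h
  | cons x rest ih =>
    obtain ⟨key, od⟩ := x
    have hb := pvBTier_bounds ml cw key od
    intro c' h
    rw [pvBestOf_cons] at h
    generalize hgt : pvBTier ml cw key od = t at h hb
    split_ifs at h with hcond
    · cases h
      exact ⟨hb.1, hcond.1⟩
    · exact ih c' h

lemma pvMerge_step (t : Nat) (k : String) (o : List (String × String))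
    (best c : Option (Nat × String × List (String × String)))
    (hb : ∀ b', best = some b' → b'.1 < 4)
    (hc : ∀ c', c = some c' → c'.1 < 4) :
    pvMerge (if t < pvBT best then some (t, k, o) else best) c
      = pvMerge best (if t < 4 ∧ t ≤ pvBT c then some (t, k, o) else c) := by
  cases best with
  | none =>
    cases c with
    | none =>
      simp only [pvMerge, pvBT]
      split_ifs <;> simp_all <;> omega
    | some c' =>
      have hc4 := hc c' rfl
      simp only [pvMerge, pvBT]
      split_ifs <;> simp_all <;> omega
  | some b =>
    have hb4 := hb b rfl
    cases c with
    | none =>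
      simp only [pvMerge, pvBT]
      split_ifs <;> simp_all <;> omega
    | some c' =>
      have hc4 := hc c' rfl
      simp only [pvMerge, pvBT]
      split_ifs <;> simp_all <;> omega

lemma pvLoop_eq_merge (ml : String) (cw : List String) (xs : List (String × List (String × String)))
    (best : Option (Nat × String × List (String × String)))
    (hb : ∀ b', best = some b' → b'.1 < 4) :
    pvBLoop ml cw xs best = pvMerge best (pvBestOf ml cw xs) := by
  induction xs generalizing best with
  | nil => cases best <;> rfl
  | cons x rest ih =>
    obtain ⟨key, od⟩ := x
    have hbnd := pvBTier_bounds ml cw key od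
    rw [pvBLoop_cons, pvBestOf_cons]
    generalize hgt : pvBTier ml cw key od = t at *
    have hBT4 : pvBT best ≤ 4 := by
      cases hb' : best with
      | none => simp [pvBT]
      | some b'' => simp only [pvBT]; exact le_of_lt (hb b'' hb')
    have hstep : ∀ b', (if t < pvBT best then some (t, key, od) else best) = some b' → b'.1 < 4 := by
      intro b' h
      split_ifs at h with hlt
      · cases h; simpa using lt_of_lt_of_le hlt hBT4
      · exact hb b' h
    rw [ih _ hstep]
    exact pvMerge_step t key od best _ hb (fun c' h => (pvBestOf_bounds ml cw rest c' h).2)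

-- main invariant: A's chain equals B's finalized best, with tier-1/tier-2 bookkeeping
lemma pvMain (ml mn cl : String) (cw : List String)
    (hcw : cw = (PySem.Str.split₀ (PySem.Str.replace cl "_" " ")).filter (fun w => 3 < PySem.Str.len w))
    (xs : List (String × List (String × String))) :
    pvChain ml mn cl xs = pvFinB mn (pvBestOf ml cw xs)
    ∧ (pvAPass1 ml mn xs ≠ none ↔ pvBT (pvBestOf ml cw xs) = 1)
    ∧ (pvAPass1 ml mn xs = none → (pvAPass2 ml mn xs ≠ none ↔ pvBT (pvBestOf ml cw xs) = 2)) := by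
  induction xs with
  | nil =>
    refine ⟨rfl, by simp [pvAPass1, pvBestOf, pvBT], by simp [pvAPass2, pvBestOf, pvBT]⟩
  | cons x rest ih =>
    obtain ⟨key, od⟩ := x
    obtain ⟨ihA, ihB, ihC⟩ := ih
    have hb1 : 1 ≤ pvBT (pvBestOf ml cw rest) := by
      cases hbo : pvBestOf ml cw rest with
      | none => simp [pvBT]
      | some c' => simp only [pvBT]; exact (pvBestOf_bounds ml cw rest c' hbo).1
    by_cases h1 : (PySem.Str.isIn ml (pvAMField od) || PySem.Str.isIn (pvAMField od) ml) = true
    · -- tier 1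
      have htier : pvBTier ml cw key od = 1 := by rw [pvBTier_eq, if_pos h1]
      have hbo : pvBestOf ml cw ((key, od) :: rest) = some (1, key, od) := by
        rw [pvBestOf_cons, htier, if_pos ⟨by omega, hb1⟩]
      have hp1 : pvAPass1 ml mn ((key, od) :: rest) = some (some od, some ((od.lookup "measure").getD mn)) := by
        rw [pvAPass1_cons, if_pos h1]
      refine ⟨?_, ?_, ?_⟩
      · rw [pvChain_eq, hp1, hbo]; rfl
      · rw [hp1, hbo]; simp [pvBT]
      · rw [hp1]; intro h; cases h
    · -- not tier 1
      have hp1 : pvAPass1 ml mn ((key, od) :: rest) = pvAPass1 ml mn rest := by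
        rw [pvAPass1_cons, if_neg h1]
      by_cases h2 : PySem.Str.isIn ml (pvAKeyNorm key) = true
      · -- tier 2
        have htier : pvBTier ml cw key od = 2 := by rw [pvBTier_eq, if_neg h1, if_pos h2]
        have hp2 : pvAPass2 ml mn ((key, od) :: rest) = some (some od, some ((od.lookup "measure").getD mn)) := by
          rw [pvAPass2_cons, if_pos h2]
        cases hq1 : pvAPass1 ml mn rest with
        | some r =>
          have hbt1 : pvBT (pvBestOf ml cw rest) = 1 := ihB.mp (by simp [hq1])
          have hbo : pvBestOf ml cw ((key, od) :: rest) = pvBestOf ml cw rest := by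
            rw [pvBestOf_cons, htier, if_neg (by omega)]
          refine ⟨?_, ?_, ?_⟩
          · rw [pvChain_eq, hp1, hq1, hbo, ← ihA, pvChain_eq, hq1]
          · rw [hp1, hq1, hbo, hbt1]; simp
          · rw [hp1, hq1]; intro h; cases h
        | none =>
          have hbtne : pvBT (pvBestOf ml cw rest) ≠ 1 := fun h => by simp [ihB.mpr h] at hq1
          have hbo : pvBestOf ml cw ((key, od) :: rest) = some (2, key, od) := by
            rw [pvBestOf_cons, htier, if_pos ⟨by omega, by omega⟩]
          refine ⟨?_, ?_, ?_⟩
          · rw [pvChain_eq, hp1, hq1, hp2, hbo]; rfl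
          · rw [hp1, hq1, hbo]; simp [pvBT]
          · intro _; rw [hp2, hbo]; simp [pvBT]
      · -- not tier 1, not tier 2
        have hp2 : pvAPass2 ml mn ((key, od) :: rest) = pvAPass2 ml mn rest := by
          rw [pvAPass2_cons, if_neg h2]
        by_cases h3 : ((PySem.Str.split₀ (PySem.Str.replace cl "_" " ")).filter (fun w => 3 < PySem.Str.len w)).any (fun w => PySem.Str.isIn w (pvAKeyNorm key)) = true
        · -- tier 3
          have htier : pvBTier ml cw key od = 3 := by
            rw [pvBTier_eq, if_neg h1, if_neg h2, if_pos (by rw [hcw]; exact h3)]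
          have hp3 : pvAPass3 cl ((key, od) :: rest) = some (some od, some ((od.lookup "measure").getD key)) := by
            rw [pvAPass3_cons, if_pos h3]
          cases hq1 : pvAPass1 ml mn rest with
          | some r =>
            have hbt1 : pvBT (pvBestOf ml cw rest) = 1 := ihB.mp (by simp [hq1])
            have hbo : pvBestOf ml cw ((key, od) :: rest) = pvBestOf ml cw rest := by
              rw [pvBestOf_cons, htier, if_neg (by omega)]
            refine ⟨?_, ?_, ?_⟩
            · rw [pvChain_eq, hp1, hq1, hbo, ← ihA, pvChain_eq, hq1]
            · rw [hp1, hq1, hbo, hbt1]; simp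
            · rw [hp1, hq1]; intro h; cases h
          | none =>
            have hbtne : pvBT (pvBestOf ml cw rest) ≠ 1 := fun h => by simp [ihB.mpr h] at hq1
            cases hq2 : pvAPass2 ml mn rest with
            | some r =>
              have hbt2 : pvBT (pvBestOf ml cw rest) = 2 := (ihC hq1).mp (by simp [hq2])
              have hbo : pvBestOf ml cw ((key, od) :: rest) = pvBestOf ml cw rest := by
                rw [pvBestOf_cons, htier, if_neg (by omega)]
              refine ⟨?_, ?_, ?_⟩
              · rw [pvChain_eq, hp1, hq1, hp2, hq2, hbo, ← ihA, pvChain_eq, hq1, hq2]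
              · rw [hp1, hq1, hbo, hbt2]; simp
              · intro _; rw [hp2, hq2, hbo, hbt2]; simp
            | none =>
              have hbtne2 : pvBT (pvBestOf ml cw rest) ≠ 2 := fun h => by simp [(ihC hq1).mpr h] at hq2
              have hbo : pvBestOf ml cw ((key, od) :: rest) = some (3, key, od) := by
                rw [pvBestOf_cons, htier, if_pos ⟨by omega, by omega⟩]
              refine ⟨?_, ?_, ?_⟩
              · rw [pvChain_eq, hp1, hq1, hp2, hq2, hp3, hbo]; rfl
              · rw [hp1, hq1, hbo]; simp [pvBT]
              · intro _; rw [hp2, hq2, hbo]; simp [pvBT]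
        · -- tier 4
          have htier : pvBTier ml cw key od = 4 := by
            rw [pvBTier_eq, if_neg h1, if_neg h2, if_neg (by rw [hcw]; exact h3)]
          have hp3 : pvAPass3 cl ((key, od) :: rest) = pvAPass3 cl rest := by
            rw [pvAPass3_cons, if_neg h3]
          have hbo : pvBestOf ml cw ((key, od) :: rest) = pvBestOf ml cw rest := by
            rw [pvBestOf_cons, htier, if_neg (by omega)]
          refine ⟨?_, ?_, ?_⟩
          · rw [pvChain_eq, hp1, hp2, hp3, hbo, ← ihA, pvChain_eq]
          · rw [hp1, hbo]; exact ihB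
          · rw [hp1, hp2, hbo]; exact ihC

lemma pvFind_eq_chain (outcomes : List (String × List (String × String))) (mn oc : String) :
    find_outcome_data_py outcomes mn oc
      = pvChain (PySem.Str.strip (PySem.Str.lower mn)) mn (PySem.Str.strip (PySem.Str.lower oc)) outcomes := by
  cases outcomes with
  | nil => rfl
  | cons x rest =>
    rw [pvChain_eq]
    simp only [find_outcome_data_py, List.isEmpty_cons, Bool.false_eq_true, if_false]

lemma pvAlt_eq_finB (outcomes : List (String × List (String × String))) (mn oc : String) :
    find_outcome_data_py_alt outcomes mn oc
      = pvFinB mn (pvBLoop (PySem.Str.strip (PySem.Str.lower mn))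
          ((PySem.Str.split₀ (PySem.Str.replace (PySem.Str.strip (PySem.Str.lower oc)) "_" " ")).filter
            (fun w => 3 < PySem.Str.len w)) outcomes none) := rfl

-- ===== VERDICT (by name: the statement is the Claim_ definition above) =====
theorem find_outcome_data_py_spec : Claim_equal_find_outcome_data_py := by
  intro outcomes mn oc _
  unfold Spec_find_outcome_data_py
  rw [pvFind_eq_chain,
      (pvMain (PySem.Str.strip (PySem.Str.lower mn)) mn (PySem.Str.strip (PySem.Str.lower oc)) _ rfl outcomes).1,
      pvAlt_eq_finB, pvLoop_eq_merge _ _ _ none (fun _ h => by cases h)]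
  cases hbo : pvBestOf (PySem.Str.strip (PySem.Str.lower mn))
      ((PySem.Str.split₀ (PySem.Str.replace (PySem.Str.strip (PySem.Str.lower oc)) "_" " ")).filter
        (fun w => 3 < PySem.Str.len w)) outcomes with
  | none => rfl
  | some c' =>
    simp only [pvMerge, pvBT]
    rw [if_pos (pvBestOf_bounds _ _ _ c' hbo).2]
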